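-- pv_equiv track=rewrite | github.com/Arsen1302/Code-copy-detector | TestData/solutions/problem_1518_3.py | solution_1518_3
-- ===== SOURCE A (Python) =====
-- from typing import List
--
-- def solution_1518_3(nums: List[int]) -> bool:
--     not_a_pair = set()
--
--     for x in nums:
--         if x not in not_a_pair:
--             not_a_pair.add(x)
--         else:
--             not_a_pair.remove(x)
--     return not not_a_pair
-- ===== SOURCE B (Python) =====
-- from typing import List
--
-- def solution_1518_3(nums: List[int]) -> bool:
--     s = sorted(nums)
--     i = 0
--     n = len(s)
--     while i + 1 < n:
--         if s[i] != s[i + 1]: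
--             return False
--         i += 2
--     return i == n
-- ===== Notes on version B (the rewrite author's own statement) =====
-- stated objective: alternative
-- what changed: Replaces the online hash-set parity toggle with sort-then-pair-scan: sort the list, then walk adjacent pairs (s[i], s[i+1]) with stride 2 checking each pair is equal, which holds exactly when every value occurs an even number of times.
import Mathlib
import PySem

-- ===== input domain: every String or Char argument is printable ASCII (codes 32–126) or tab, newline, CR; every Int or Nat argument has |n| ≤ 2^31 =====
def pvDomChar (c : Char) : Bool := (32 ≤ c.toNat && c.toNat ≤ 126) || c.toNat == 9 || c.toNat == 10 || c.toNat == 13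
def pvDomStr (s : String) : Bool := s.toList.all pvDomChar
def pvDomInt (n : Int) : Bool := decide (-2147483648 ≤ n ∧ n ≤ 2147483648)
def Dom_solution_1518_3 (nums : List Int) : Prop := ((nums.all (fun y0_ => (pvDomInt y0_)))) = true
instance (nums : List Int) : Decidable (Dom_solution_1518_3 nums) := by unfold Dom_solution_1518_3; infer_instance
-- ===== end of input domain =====

-- B replaces A's online parity-toggle set with sort-then-pair-scan: sort, then
-- check adjacent pairs at even offsets are equal (a different algorithm, O(n log n)).


-- ===== PORT A =====
-- the loop body: 'if x not in not_a_pair: not_a_pair.add(x) else: not_a_pair.remove(x)'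
-- (remove never raises: the else branch guarantees x is in the set)
def pvToggle (s : PySem.Set Int) (x : Int) : PySem.Set Int :=
  if ¬ (PySem.Set.contains s x = true) then PySem.Set.add s x else PySem.Set.discard s x

def solution_1518_3 (nums : List Int) : Bool :=
  (nums.foldl pvToggle PySem.Set.empty).isEmpty

-- ===== PORT B =====
-- the while loop 'while i+1 < n: if s[i] != s[i+1]: return False; i += 2' followed by
-- 'return i == n', transcribed as the obvious two-at-a-time structural recursion on the
-- sorted list (i+1 < n ⟺ at least two elements remain; i == n at exit ⟺ zero remain)
def pvPairScan : List Int → Bool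
  | a :: b :: t => if a ≠ b then false else pvPairScan t
  | [_] => false
  | [] => true

def solution_1518_3_alt (nums : List Int) : Bool :=
  pvPairScan (PySem.List.sorted nums (fun x => x) false)

-- ===== PRECONDITION & SPEC =====
def Spec_solution_1518_3 (nums : List Int) (out : Bool) : Prop := out = solution_1518_3_alt nums
instance (nums : List Int) (out : Bool) : Decidable (Spec_solution_1518_3 nums out) := by unfold Spec_solution_1518_3; infer_instance

-- ===== CLAIM (what is proved, stated in full; the proofs are below) =====
def Claim_equal_solution_1518_3 : Prop := ∀ (nums : List Int), Dom_solution_1518_3 nums → Spec_solution_1518_3 nums (solution_1518_3 nums)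

-- ===== LEMMAS AND PROOFS =====

lemma pvToggle_mem (s : PySem.Set Int) (a x : Int) :
    x ∈ pvToggle s a ↔ (if x = a then x ∉ s else x ∈ s) := by
  unfold pvToggle PySem.Set.add PySem.Set.discard PySem.Set.contains
  by_cases hx : x = a <;> by_cases h : a ∈ s <;>
    simp [hx, h, List.mem_filter]

lemma pvToggle_foldl_mem (l : List Int) : ∀ (s : PySem.Set Int) (x : Int),
    x ∈ l.foldl pvToggle s ↔ (x ∈ s ↔ l.count x % 2 = 0) := by
  induction l with
  | nil => intro s x; simp
  | cons a t ih =>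
    intro s x
    rw [List.foldl_cons, ih, pvToggle_mem]
    by_cases hx : x = a
    · subst hx
      simp only [List.count_cons_self]
      by_cases hp : x ∈ s <;>
        rcases Nat.mod_two_eq_zero_or_one (t.count x) with he | he <;>
        (first
          | (have he2 : (t.count x + 1) % 2 = 1 := by omega
             simp [hp, he, he2])
          | (have he2 : (t.count x + 1) % 2 = 0 := by omega
             simp [hp, he, he2]))
    · have hax : a ≠ x := fun h => hx h.symm
      simp [hax, hx]

lemma solution_A_true_iff (nums : List Int) :
    solution_1518_3 nums = true ↔ ∀ x : Int, nums.count x % 2 = 0 := by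
  unfold solution_1518_3
  rw [List.isEmpty_iff, List.eq_nil_iff_forall_not_mem]
  constructor
  · intro h x
    by_contra he
    exact h x ((pvToggle_foldl_mem nums PySem.Set.empty x).mpr
      (by simp only [PySem.Set.empty, List.not_mem_nil, false_iff]; omega))
  · intro h x hx
    have := (pvToggle_foldl_mem nums PySem.Set.empty x).mp hx
    simp [PySem.Set.empty, h x] at this

-- on a (weakly) sorted list, the pair scan succeeds iff every value's count is even
lemma pvPairScan_sorted_iff : ∀ (s : List Int), s.Pairwise (· ≤ ·) →
    (pvPairScan s = true ↔ ∀ x : Int, s.count x % 2 = 0) := by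
  intro s
  induction s using pvPairScan.induct with
  | case1 a b t hne =>
    intro hp
    have hab : a ≤ b := (List.pairwise_cons.mp hp).1 b (List.mem_cons_self ..)
    rw [show pvPairScan (a :: b :: t) = false from by simp [pvPairScan, hne]]
    simp only [Bool.false_eq_true, false_iff]
    intro h
    -- a occurs exactly once: a < b ≤ every element of t
    have hlt : a < b := lt_of_le_of_ne hab hne
    have hnotmem : a ∉ b :: t := by
      intro hm
      rcases List.mem_cons.mp hm with h1 | h2
      · exact hne h1
      · have hbt : b ≤ a := (List.pairwise_cons.mp (List.pairwise_cons.mp hp).2).1 a h2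
        exact absurd (lt_of_lt_of_le hlt hbt) (lt_irrefl a)
    have := h a
    rw [List.count_cons_self, List.count_eq_zero_of_not_mem hnotmem] at this
    omega
  | case2 a b t hne ih =>
    intro hp
    have heq : a = b := not_not.mp (by simpa using hne)
    subst heq
    have hpt : t.Pairwise (· ≤ ·) :=
      ((List.pairwise_cons.mp (List.pairwise_cons.mp hp).2).2)
    rw [show pvPairScan (a :: a :: t) = pvPairScan t from by simp [pvPairScan],
        ih hpt]
    constructor
    · intro h x
      by_cases hx : x = a
      · subst hx
        have := h x
        rw [List.count_cons_self, List.count_cons_self]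
        omega
      · have hax : a ≠ x := fun h' => hx h'.symm
        simpa [List.count_cons, hax] using h x
    · intro h x
      have := h x
      by_cases hx : x = a
      · subst hx
        rw [List.count_cons_self, List.count_cons_self] at this
        omega
      · have hax : a ≠ x := fun h' => hx h'.symm
        simpa [List.count_cons, hax] using this
  | case3 a =>
    intro _
    rw [show pvPairScan [a] = false from rfl]
    simp only [Bool.false_eq_true, false_iff]
    intro h
    have := h a
    simp [List.count_cons_self] at this
  | case4 =>
    intro _
    simp [pvPairScan]

lemma solution_B_true_iff (nums : List Int) :
    solution_1518_3_alt nums = true ↔ ∀ x : Int, nums.count x % 2 = 0 := by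
  unfold solution_1518_3_alt
  have hperm : (PySem.List.sorted nums (fun x => x) false).Perm nums :=
    PySem.List.sorted_perm ..
  rw [pvPairScan_sorted_iff _ (by simpa using PySem.List.sorted_pairwise nums (fun x => x))]
  constructor <;> intro h x
  · rw [← hperm.count_eq]; exact h x
  · rw [hperm.count_eq]; exact h x

-- ===== VERDICT (by name: the statement is the Claim_ definition above) =====
theorem solution_1518_3_spec : Claim_equal_solution_1518_3 := by
  intro nums _
  unfold Spec_solution_1518_3
  rw [Bool.eq_iff_iff, solution_A_true_iff, solution_B_true_iff]
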